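-- pv_equiv track=rewrite | github.com/cltl/clariah-voc-scripts | gm_index_page.py | word_sequences
-- ===== SOURCE A (Python) =====
-- def is_page_number_range_or_comma(w):
--     return w == ',' or w == '%' or w.replace('.', '').replace(',', '').replace('-', '').replace('%', '').isdigit()
--
-- def word_sequences(word_page_seqs):
--     """Detects and joins contiguous words in a list of words and page numbers.
--
--     Returns a list of grouped words."""
--     w_seqs = []
--     ws = []
--     for w in word_page_seqs:
--         if is_page_number_range_or_comma(w):
--             if ws:
--                 w_seqs.append(" ".join(ws))
--                 ws = []
--         elif not w.isupper():       # excludes INDEX VAN ...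
--             ws.append(w)
--     return w_seqs
-- ===== SOURCE B (Python) =====
-- def is_page_number_range_or_comma(w):
--     return w == ',' or w == '%' or w.replace('.', '').replace(',', '').replace('-', '').replace('%', '').isdigit()
--
-- def word_sequences(word_page_seqs):
--     """Segment-splitting reimplementation: repeatedly scan to the next
--     delimiter token, emit the join of the preceding segment with uppercase
--     words dropped (if non-empty), and continue after the delimiter; a trailing
--     segment with no following delimiter is never emitted."""
--     out = []
--     rest = word_page_seqs
--     while True:
--         i = 0
--         while i < len(rest) and not is_page_number_range_or_comma(rest[i]):
--             i += 1
--         if i == len(rest):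
--             return out
--         words = [w for w in rest[:i] if not w.isupper()]
--         if words:
--             out.append(" ".join(words))
--         rest = rest[i + 1:]
-- ===== Notes on version B (the rewrite author's own statement) =====
-- stated objective: alternative
-- what changed: Replaced A's flush-on-delimiter state machine (pending-words accumulator flushed whenever a page-number/comma token arrives) by a segment-splitting pass that scans to the next delimiter, joins the preceding segment with uppercase words filtered out, and continues after the delimiter; a trailing segment with no following delimiter is naturally never emitted, matching A.
import Mathlib
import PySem

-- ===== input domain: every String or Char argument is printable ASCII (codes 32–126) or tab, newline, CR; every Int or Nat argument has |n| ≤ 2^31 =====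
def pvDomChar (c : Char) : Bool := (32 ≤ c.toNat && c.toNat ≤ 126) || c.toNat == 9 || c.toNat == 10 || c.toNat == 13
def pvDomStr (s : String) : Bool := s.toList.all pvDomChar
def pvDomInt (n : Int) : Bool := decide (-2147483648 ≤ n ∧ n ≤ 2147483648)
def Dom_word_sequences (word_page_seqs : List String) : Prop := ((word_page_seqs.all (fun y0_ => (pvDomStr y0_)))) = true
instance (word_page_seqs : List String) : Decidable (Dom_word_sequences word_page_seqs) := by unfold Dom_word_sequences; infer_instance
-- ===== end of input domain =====

-- B replaces A's flush-on-delimiter state machine by a segment-splitting loop (cut at each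
-- delimiter, emit the filtered segment); objective: alternative decomposition, same cost.

-- ===== PORT A =====
-- shared module helper: is_page_number_range_or_comma
def pvIsPage (w : String) : Bool :=
  w == "," || w == "%" ||
    PySem.Str.strIsdigit
      (PySem.Str.replace (PySem.Str.replace (PySem.Str.replace (PySem.Str.replace w "." "") "," "") "-" "") "%" "")

-- hand port of Python str.isupper (exact on the ASCII domain: cased chars are the letters)
def pvIsupper (s : String) : Bool :=
  (s.toList.any (fun c => PySem.Chars.isupper c || PySem.Chars.islower c)) &&
    (s.toList.all (fun c => !PySem.Chars.islower c))

def word_sequences (word_page_seqs : List String) : List String :=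
  (word_page_seqs.foldl
    (fun (st : List String × List String) w =>
      if pvIsPage w then
        if st.2 ≠ [] then (st.1 ++ [PySem.Str.join " " st.2], ([] : List String)) else st
      else if pvIsupper w then st
      else (st.1, st.2 ++ [w]))
    (([], []) : List String × List String)).1

-- ===== PORT B =====
def word_sequences_alt (word_page_seqs : List String) : List String :=
  -- scan to next delimiter (takeWhile/dropWhile = the inner index scan + slices of Source B),
  -- emit the filtered segment, continue after the delimiter; suffix recursion = Source B's loop
  if hr : word_page_seqs.dropWhile (fun w => !pvIsPage w) = [] then []
  else
    let words := (word_page_seqs.takeWhile (fun w => !pvIsPage w)).filter (fun w => !pvIsupper w)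
    (if words ≠ [] then [PySem.Str.join " " words] else []) ++
      word_sequences_alt ((word_page_seqs.dropWhile (fun w => !pvIsPage w)).tail)
termination_by word_page_seqs.length
decreasing_by
  have h1 := List.length_dropWhile_le (p := fun w => !pvIsPage w) (l := word_page_seqs)
  have h2 : (word_page_seqs.dropWhile (fun w => !pvIsPage w)).length ≠ 0 := by
    simpa using hr
  simp only [List.length_tail]
  omega

-- ===== PRECONDITION & SPEC =====
def Spec_word_sequences (word_page_seqs : List String) (out : List String) : Prop := out = word_sequences_alt word_page_seqs
instance (word_page_seqs : List String) (out : List String) : Decidable (Spec_word_sequences word_page_seqs out) := by unfold Spec_word_sequences; infer_instance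

-- ===== CLAIM (what is proved, stated in full; the proofs are below) =====
def Claim_equal_word_sequences : Prop := ∀ (word_page_seqs : List String), Dom_word_sequences word_page_seqs → Spec_word_sequences word_page_seqs (word_sequences word_page_seqs)

-- ===== LEMMAS AND PROOFS =====

-- A's loop body
def pvStepA (st : List String × List String) (w : String) : List String × List String :=
  if pvIsPage w then
    if st.2 ≠ [] then (st.1 ++ [PySem.Str.join " " st.2], ([] : List String)) else st
  else if pvIsupper w then st
  else (st.1, st.2 ++ [w])

-- A's remaining output given pending words ws
def pvGoA (ws : List String) : List String → List String
  | [] => []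
  | w :: t =>
    if pvIsPage w then (if ws ≠ [] then [PySem.Str.join " " ws] else []) ++ pvGoA [] t
    else if pvIsupper w then pvGoA ws t
    else pvGoA (ws ++ [w]) t

theorem pvFoldA_eq (l : List String) : ∀ (acc ws : List String),
    (l.foldl pvStepA (acc, ws)).1 = acc ++ pvGoA ws l := by
  induction l with
  | nil => intro acc ws; simp [pvGoA]
  | cons w t ih =>
    intro acc ws
    simp only [List.foldl_cons, pvStepA, pvGoA]
    by_cases hp : pvIsPage w
    · simp only [hp, if_true]
      by_cases hw : ws = []
      · subst hw; simp [ih]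
      · simp [hw, ih, List.append_assoc]
    · simp only [hp]
      by_cases hu : pvIsupper w
      · simp [hu, ih]
      · simp [hu, ih]

theorem alt_unfold (l : List String) :
    word_sequences_alt l =
      if l.dropWhile (fun w => !pvIsPage w) = [] then []
      else
        (if (l.takeWhile (fun w => !pvIsPage w)).filter (fun w => !pvIsupper w) ≠ [] then
           [PySem.Str.join " " ((l.takeWhile (fun w => !pvIsPage w)).filter (fun w => !pvIsupper w))]
         else []) ++
          word_sequences_alt ((l.dropWhile (fun w => !pvIsPage w)).tail) := by
  rw [word_sequences_alt.eq_def]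
  split <;> simp_all

theorem pvGoA_eq_alt (l : List String) : ∀ (ws : List String),
    pvGoA ws l =
      if l.dropWhile (fun w => !pvIsPage w) = [] then []
      else
        (if ws ++ (l.takeWhile (fun w => !pvIsPage w)).filter (fun w => !pvIsupper w) ≠ [] then
           [PySem.Str.join " " (ws ++ (l.takeWhile (fun w => !pvIsPage w)).filter (fun w => !pvIsupper w))]
         else []) ++
          word_sequences_alt ((l.dropWhile (fun w => !pvIsPage w)).tail) := by
  induction l with
  | nil => intro ws; simp [pvGoA]
  | cons w t ih =>
    intro ws
    by_cases hp : pvIsPage w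
    · have hd : (w :: t).dropWhile (fun w => !pvIsPage w) = w :: t := by simp [hp]
      have ht : (w :: t).takeWhile (fun w => !pvIsPage w) = [] := by simp [hp]
      rw [hd, ht]
      simp only [pvGoA, hp, reduceIte]
      rw [ih []]
      simp only [List.nil_append]
      rw [← alt_unfold t]
      simp
    · have hd : (w :: t).dropWhile (fun w => !pvIsPage w) = t.dropWhile (fun w => !pvIsPage w) := by
        simp [hp]
      have ht : (w :: t).takeWhile (fun w => !pvIsPage w) = w :: t.takeWhile (fun w => !pvIsPage w) := by
        simp [hp]
      rw [hd, ht]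
      by_cases hu : pvIsupper w
      · simp only [pvGoA, hp, hu, reduceIte]
        rw [ih ws]; simp [hu]
      · simp only [pvGoA, hp, hu]
        rw [ih (ws ++ [w])]; simp [hu]

-- ===== VERDICT (by name: the statement is the Claim_ definition above) =====
theorem word_sequences_spec : Claim_equal_word_sequences := by
  intro l _
  show word_sequences l = word_sequences_alt l
  have h1 : word_sequences l = pvGoA [] l := by
    simpa [pvStepA] using pvFoldA_eq l [] []
  rw [h1, pvGoA_eq_alt l [], alt_unfold l]
  simp
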